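-- pv_equiv track=rewrite | github.com/Victor-Gabriel-Barbosa/ED2 | HashHanny/maindivisao.py | criar_tabela_hash
-- ===== SOURCE A (Python) =====
-- def funcao_hash(nomeCidade, tamanhoTabela):
--     hash_value = 0
--     for c in nomeCidade:
--         hash_value = (hash_value + ord(c)) & 0xFFFFFFFF
--     return hash_value % tamanhoTabela
--
-- def criar_tabela_hash(cidades, tamtabela):
--     tabela_hash = [[] for _ in range(tamtabela)]
--     colisoes = 0
--
--     for cidade in cidades:
--         indice = funcao_hash(cidade, tamtabela)
--         if tabela_hash[indice]:
--             colisoes += 1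
--         tabela_hash[indice].append(cidade)
--
--     return tabela_hash, colisoes
-- ===== SOURCE B (Python) =====
-- def funcao_hash(nomeCidade, tamanhoTabela):
--     return sum(map(ord, nomeCidade)) % 0x100000000 % tamanhoTabela
--
-- def criar_tabela_hash(cidades, tamtabela):
--     indices = [funcao_hash(c, tamtabela) for c in cidades]
--     tabela_hash = [[c for c, h in zip(cidades, indices) if h == i]
--                    for i in range(tamtabela)]
--     colisoes = len(cidades) - sum(1 for b in tabela_hash if b)
--     return tabela_hash, colisoes
-- ===== Notes on version B (the rewrite author's own statement) =====
-- stated objective: alternative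
-- what changed: B is bucket-major instead of city-major: it precomputes all hash indices, then builds each bucket i by scanning the (city, index) pairs and keeping those with index i, and derives collisions in a trailing pass as len(cidades) minus the number of non-empty buckets, instead of A's single city-by-city insertion with a per-insertion collision counter; funcao_hash is a closed-form sum mod 2^32 instead of a masking fold.
-- outside the precondition, e.g. on criar_tabela_hash(['a'], 0): A raises ZeroDivisionError, B raises ZeroDivisionError; on criar_tabela_hash(['a'], -2): A raises IndexError, B returns ([], 1)
import Mathlib
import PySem

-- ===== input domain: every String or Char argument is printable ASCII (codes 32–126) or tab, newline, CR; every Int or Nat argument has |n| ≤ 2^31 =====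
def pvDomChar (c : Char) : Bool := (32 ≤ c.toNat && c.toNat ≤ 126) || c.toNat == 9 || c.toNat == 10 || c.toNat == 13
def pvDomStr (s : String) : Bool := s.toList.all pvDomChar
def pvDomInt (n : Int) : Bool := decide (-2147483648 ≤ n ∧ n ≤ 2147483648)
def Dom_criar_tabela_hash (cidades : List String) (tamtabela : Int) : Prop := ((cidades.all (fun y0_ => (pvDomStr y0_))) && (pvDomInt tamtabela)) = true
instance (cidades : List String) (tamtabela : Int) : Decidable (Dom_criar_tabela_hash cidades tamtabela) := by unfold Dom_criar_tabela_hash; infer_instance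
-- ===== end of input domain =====

-- B is bucket-major: it precomputes all hash indices, builds each bucket by scanning the
-- (city, index) pairs, and derives collisions as len(cidades) minus the number of non-empty
-- buckets; objective: alternative decomposition (not faster).

-- ===== PORT A =====
-- '& 0xFFFFFFFF' ported exactly via PySem.Int.band; ord(c) = c.toNat
def funcao_hash (nomeCidade : String) (tamanhoTabela : Int) : Int :=
  let hash_value : Int := nomeCidade.toList.foldl
    (fun hash_value c => PySem.Int.band (hash_value + (c.toNat : Int)) 0xFFFFFFFF) 0
  PySem.Int.mod hash_value tamanhoTabela

def criar_tabela_hash (cidades : List String) (tamtabela : Int) : List (List String) × Int :=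
  let tabela_hash : List (List String) := (PySem.List.pyRange 0 tamtabela 1).map (fun _ => [])
  cidades.foldl (fun (st : List (List String) × Int) cidade =>
    let indice := funcao_hash cidade tamtabela
    let bucket := PySem.List.pyGetD st.1 indice []
    let colisoes := if bucket = [] then st.2 else st.2 + 1
    (PySem.List.pySetD st.1 indice (bucket ++ [cidade]), colisoes)) (tabela_hash, 0)

-- ===== PORT B =====
def funcao_hash_alt (nomeCidade : String) (tamanhoTabela : Int) : Int :=
  PySem.Int.mod (PySem.Int.mod ((nomeCidade.toList.map (fun c => (c.toNat : Int))).sum) 0x100000000) tamanhoTabela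

-- 'sum(1 for b in tabela_hash if b)' ported as countP of non-emptiness
def criar_tabela_hash_alt (cidades : List String) (tamtabela : Int) : List (List String) × Int :=
  let indices : List Int := cidades.map (fun c => funcao_hash_alt c tamtabela)
  let tabela_hash : List (List String) := (PySem.List.pyRange 0 tamtabela 1).map
    (fun i => (cidades.zip indices).filterMap (fun p => if p.2 == i then some p.1 else none))
  let colisoes : Int := (cidades.length : Int) - ((tabela_hash.countP (fun b => !b.isEmpty)) : Int)
  (tabela_hash, colisoes)

-- ===== PRECONDITION & SPEC =====
-- On nonempty cidades A raises ZeroDivisionError when tamtabela = 0 and IndexError when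
-- tamtabela < 0 (it indexes into an empty table), so those inputs are excluded.
def Pre_criar_tabela_hash (cidades : List String) (tamtabela : Int) : Prop :=
  cidades = [] ∨ 0 < tamtabela
instance (cidades : List String) (tamtabela : Int) : Decidable (Pre_criar_tabela_hash cidades tamtabela) := by unfold Pre_criar_tabela_hash; infer_instance
def pvWitness_criar_tabela_hash : List String × Int := (["Rio", "Sao Paulo", "oiR"], 5)

def Spec_criar_tabela_hash (cidades : List String) (tamtabela : Int) (out : List (List String) × Int) : Prop := out = criar_tabela_hash_alt cidades tamtabela
instance (cidades : List String) (tamtabela : Int) (out : List (List String) × Int) : Decidable (Spec_criar_tabela_hash cidades tamtabela out) := by unfold Spec_criar_tabela_hash; infer_instance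

-- ===== CLAIM (what is proved, stated in full; the proofs are below) =====
def Claim_equal_criar_tabela_hash : Prop := ∀ (cidades : List String) (tamtabela : Int), Dom_criar_tabela_hash cidades tamtabela → Pre_criar_tabela_hash cidades tamtabela → Spec_criar_tabela_hash cidades tamtabela (criar_tabela_hash cidades tamtabela)

-- ===== LEMMAS AND PROOFS =====

-- a & 0xFFFFFFFF = a % 2^32 on nonnegative a
theorem pv_band_mask (a : Int) (ha : 0 ≤ a) : PySem.Int.band a 0xFFFFFFFF = a % 4294967296 := by
  rw [PySem.Int.band_of_nonneg ha (by norm_num)]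
  have h1 : (0xFFFFFFFF : Int).toNat = 2 ^ 32 - 1 := rfl
  rw [h1, Nat.and_two_pow_sub_one_eq_mod]
  have := Int.toNat_of_nonneg ha
  omega

theorem pv_hash_fold (l : List Char) : ∀ h : Int, 0 ≤ h → h < 4294967296 →
    l.foldl (fun hash_value c => PySem.Int.band (hash_value + (c.toNat : Int)) 0xFFFFFFFF) h
      = (h + (l.map (fun c => (c.toNat : Int))).sum) % 4294967296 := by
  induction l with
  | nil => intro h h0 h1; simp [Int.emod_eq_of_lt h0 h1]
  | cons c l ih =>
    intro h h0 h1
    simp only [List.foldl_cons, List.map_cons, List.sum_cons]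
    rw [pv_band_mask _ (by positivity)]
    rw [ih _ (Int.emod_nonneg _ (by norm_num)) (Int.emod_lt_of_pos _ (by norm_num))]
    rw [Int.emod_add_emod]
    ring_nf

theorem pv_hash_eq (s : String) (tam : Int) : funcao_hash s tam = funcao_hash_alt s tam := by
  simp only [funcao_hash, funcao_hash_alt]
  rw [pv_hash_fold s.toList 0 le_rfl (by norm_num), zero_add,
    PySem.Int.mod_eq_emod_of_pos (a := (s.toList.map (fun c => (c.toNat : Int))).sum) (by norm_num)]

-- named loop body of A and the bucket-major view of B's table
def pvAstep (tam : Int) (st : List (List String) × Int) (cidade : String) : List (List String) × Int :=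
  let indice := funcao_hash cidade tam
  let bucket := PySem.List.pyGetD st.1 indice []
  let colisoes := if bucket = [] then st.2 else st.2 + 1
  (PySem.List.pySetD st.1 indice (bucket ++ [cidade]), colisoes)

def pvBucket (tam : Int) (l : List String) (i : Int) : List String :=
  l.filter (fun c => funcao_hash_alt c tam == i)

def pvTbl (tam : Int) (l : List String) : List (List String) :=
  (PySem.List.pyRange 0 tam 1).map (pvBucket tam l)

theorem pv_zip_filterMap (l : List String) (g : String → Int) (i : Int) :
    (l.zip (l.map g)).filterMap (fun p => if p.2 == i then some p.1 else none)
      = l.filter (fun c => g c == i) := by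
  induction l with
  | nil => rfl
  | cons c l ih =>
    simp only [List.map_cons, List.zip_cons_cons, List.filterMap_cons, List.filter_cons, ih]
    by_cases h : (g c == i) = true <;> simp [h]

theorem pv_alt_view (cidades : List String) (tam : Int) :
    criar_tabela_hash_alt cidades tam
      = (pvTbl tam cidades,
         (cidades.length : Int) - (((pvTbl tam cidades).countP (fun b => !b.isEmpty)) : Int)) := by
  simp only [criar_tabela_hash_alt, pv_zip_filterMap]
  rfl

theorem pv_countP_set {α : Type} (p : α → Bool) : ∀ (xs : List α) (k : Nat) (v : α) (hk : k < xs.length),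
    (((xs.set k v).countP p) : Int)
      = ((xs.countP p) : Int) - (if p (xs.get ⟨k, hk⟩) then 1 else 0) + (if p v then 1 else 0) := by
  intro xs
  induction xs with
  | nil => intro k v hk; simp at hk
  | cons x xs ih =>
    intro k v hk
    cases k with
    | zero =>
      simp only [List.set_cons_zero, List.countP_cons, List.get_eq_getElem, List.getElem_cons_zero]
      split_ifs <;> push_cast <;> omega
    | succ k =>
      have hk' : k < xs.length := by simpa using hk
      simp only [List.set_cons_succ, List.countP_cons, List.get_eq_getElem, List.getElem_cons_succ]
      have := ih k v hk'
      simp only [List.get_eq_getElem] at this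
      push_cast at this ⊢
      split_ifs at this ⊢ <;> omega

theorem pv_bucket_append (tam : Int) (l : List String) (c : String) (i : Int) :
    pvBucket tam (l ++ [c]) i
      = pvBucket tam l i ++ (if funcao_hash_alt c tam == i then [c] else []) := by
  simp only [pvBucket, List.filter_append, List.filter_cons, List.filter_nil]

theorem pv_tbl_nil (tam : Int) : pvTbl tam [] = (PySem.List.pyRange 0 tam 1).map (fun _ => []) := by
  unfold pvTbl
  exact List.map_congr_left (fun i _ => by simp [pvBucket])

theorem pv_count_nil (tam : Int) : (pvTbl tam []).countP (fun b => !b.isEmpty) = 0 := by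
  rw [pv_tbl_nil, List.countP_eq_zero]
  intro b hb
  rcases List.mem_map.1 hb with ⟨_, _, h⟩
  simp [← h]

theorem pv_tbl_len (tam : Int) (l : List String) : (pvTbl tam l).length = tam.toNat := by
  simp [pvTbl, PySem.List.length_pyRange_one]

theorem pv_set_tbl (tam : Int) (l : List String) (c : String)
    (h0 : 0 ≤ funcao_hash_alt c tam) (h1 : funcao_hash_alt c tam < tam) :
    (pvTbl tam l).set (funcao_hash_alt c tam).toNat
        (pvBucket tam l (funcao_hash_alt c tam) ++ [c]) = pvTbl tam (l ++ [c]) := by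
  apply List.ext_getElem
  · simp [pvTbl]
  · intro k hk hk'
    have hkr : (k : Int) < tam := by
      simp only [pvTbl, List.length_set, List.length_map, PySem.List.length_pyRange_one] at hk
      omega
    simp only [pvTbl, List.getElem_set, List.getElem_map,
      PySem.List.getElem_pyRange_one, zero_add]
    rw [pv_bucket_append]
    by_cases he : (funcao_hash_alt c tam).toNat = k
    · have heq : funcao_hash_alt c tam = (k : Int) := by omega
      simp [heq]
    · have hne : (funcao_hash_alt c tam == (k : Int)) = false := by
        simp only [beq_eq_false_iff_ne, ne_eq]
        omega
      simp [he, hne]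

theorem pv_loop (tam : Int) (htam : 0 < tam) (l : List String) :
    l.foldl (pvAstep tam) (pvTbl tam [], 0)
      = (pvTbl tam l,
         (l.length : Int) - (((pvTbl tam l).countP (fun b => !b.isEmpty)) : Int)) := by
  induction l using List.reverseRecOn with
  | nil => simp [pv_count_nil]
  | append_singleton l c ih =>
    rw [List.foldl_append, ih, List.foldl_cons, List.foldl_nil]
    have hh := pv_hash_eq c tam
    have h0 : 0 ≤ funcao_hash_alt c tam := by rw [← hh]; exact PySem.Int.mod_nonneg _ htam
    have h1 : funcao_hash_alt c tam < tam := by rw [← hh]; exact PySem.Int.mod_lt _ htam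
    have hklt : (funcao_hash_alt c tam).toNat < (pvTbl tam l).length := by
      rw [pv_tbl_len]; omega
    have hget : PySem.List.pyGetD (pvTbl tam l) (funcao_hash_alt c tam) []
        = pvBucket tam l (funcao_hash_alt c tam) := by
      unfold pvTbl
      rw [PySem.List.pyGetD_map_pyRange_of_nonneg _ tam _ [] h0 h1]
    have hgetE : (pvTbl tam l).get ⟨(funcao_hash_alt c tam).toNat, hklt⟩
        = pvBucket tam l (funcao_hash_alt c tam) := by
      simp only [List.get_eq_getElem, pvTbl, List.getElem_map, PySem.List.getElem_pyRange_one]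
      congr 1
      omega
    simp only [pvAstep, hh, hget, PySem.List.pySetD_of_nonneg _ _ h0]
    rw [pv_set_tbl tam l c h0 h1]
    refine Prod.ext rfl ?_
    have hc : ((( pvTbl tam (l ++ [c])).countP (fun b => !b.isEmpty)) : Int)
        = (((pvTbl tam l).countP (fun b => !b.isEmpty)) : Int)
          - (if pvBucket tam l (funcao_hash_alt c tam) = [] then 0 else 1) + 1 := by
      rw [← pv_set_tbl tam l c h0 h1,
        pv_countP_set (fun b => !b.isEmpty) (pvTbl tam l) _ _ hklt, hgetE]
      by_cases hb : pvBucket tam l (funcao_hash_alt c tam) = [] <;>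
        simp [hb]
    rw [hc]
    simp only [List.length_append, List.length_cons, List.length_nil]
    by_cases hb : pvBucket tam l (funcao_hash_alt c tam) = [] <;>
      simp only [hb, if_true, if_false] <;> push_cast <;> omega

-- ===== VERDICT (by name: the statement is the Claim_ definition above) =====
theorem criar_tabela_hash_spec : Claim_equal_criar_tabela_hash := by
  intro cidades tam _ hpre
  unfold Spec_criar_tabela_hash
  rw [pv_alt_view]
  rcases hpre with hnil | htam
  · subst hnil
    rw [show criar_tabela_hash [] tam
        = ((PySem.List.pyRange 0 tam 1).map (fun _ => []), 0) from rfl,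
      ← pv_tbl_nil tam, pv_count_nil]
    simp
  · rw [show criar_tabela_hash cidades tam
        = cidades.foldl (pvAstep tam) ((PySem.List.pyRange 0 tam 1).map (fun _ => []), 0) from rfl,
      ← pv_tbl_nil tam, pv_loop tam htam cidades]
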